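-- pv_equiv track=rewrite | github.com/atharvakarval-dev/Form-Flow-AI | form-flow-backend/services/form/processors/conditional_handler.py | get_suggested_fill_order
-- ===== SOURCE A (Python) =====
-- from typing import Dict, List, Any, Optional, Set
--
-- def get_suggested_fill_order(
--     fields: List[Dict],
--     dependencies: Dict[str, List[Dict]]
-- ) -> List[str]:
--     """
--     Get suggested order to fill fields based on dependencies.
--
--     Trigger fields should be filled before their dependents.
--
--     Args:
--         fields: List of field dicts
--         dependencies: Dependency mapping from detect_conditional_triggers
--
--     Returns:
--         Ordered list of field names
--     """
--     field_names = [f.get('name') for f in fields if f.get('name')]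
--
--     # Build simple dependency graph
--     dependents: Dict[str, Set[str]] = {}
--     for trigger, deps in dependencies.items():
--         if trigger not in dependents:
--             dependents[trigger] = set()
--         for dep in deps:
--             dep_name = dep.get('field', '')
--             if dep_name:
--                 dependents[trigger].add(dep_name)
--
--     # Topological sort (simplified - just put triggers first)
--     triggers = list(dependents.keys())
--     dependent_fields = set()
--     for deps in dependents.values():
--         dependent_fields.update(deps)
--
--     ordered = []
--
--     # Add triggers first
--     for name in field_names:
--         if name in triggers:
--             ordered.append(name)
--
--     # Add non-dependent fields
--     for name in field_names:
--         if name not in triggers and name not in dependent_fields: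
--             ordered.append(name)
--
--     # Add dependent fields last
--     for name in field_names:
--         if name in dependent_fields and name not in ordered:
--             ordered.append(name)
--
--     return ordered
-- ===== SOURCE B (Python) =====
-- def get_suggested_fill_order(fields, dependencies):
--     trigger_set = set(dependencies.keys())
--     dep_set = set()
--     for deps in dependencies.values():
--         for dep in deps:
--             n = dep.get('field', '')
--             if n:
--                 dep_set.add(n)
--     trig, indep, dep_out = [], [], []
--     seen = set()
--     for f in fields:
--         name = f.get('name')
--         if not name:
--             continue
--         if name in trigger_set:
--             trig.append(name)
--         elif name not in dep_set:
--             indep.append(name)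
--         elif name not in seen:
--             seen.add(name)
--             dep_out.append(name)
--     return trig + indep + dep_out
-- ===== Notes on version B (the rewrite author's own statement) =====
-- stated objective: alternative
-- what changed: B drops A's per-trigger dict of dependent-name sets (building the trigger set and the flat dependent-name set directly) and replaces A's three classification passes over field_names, including the 'name not in ordered' list scan, with one single pass that appends each name to a triggers/independents/dependents list, deduping dependents with a seen-set.
import Mathlib
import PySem

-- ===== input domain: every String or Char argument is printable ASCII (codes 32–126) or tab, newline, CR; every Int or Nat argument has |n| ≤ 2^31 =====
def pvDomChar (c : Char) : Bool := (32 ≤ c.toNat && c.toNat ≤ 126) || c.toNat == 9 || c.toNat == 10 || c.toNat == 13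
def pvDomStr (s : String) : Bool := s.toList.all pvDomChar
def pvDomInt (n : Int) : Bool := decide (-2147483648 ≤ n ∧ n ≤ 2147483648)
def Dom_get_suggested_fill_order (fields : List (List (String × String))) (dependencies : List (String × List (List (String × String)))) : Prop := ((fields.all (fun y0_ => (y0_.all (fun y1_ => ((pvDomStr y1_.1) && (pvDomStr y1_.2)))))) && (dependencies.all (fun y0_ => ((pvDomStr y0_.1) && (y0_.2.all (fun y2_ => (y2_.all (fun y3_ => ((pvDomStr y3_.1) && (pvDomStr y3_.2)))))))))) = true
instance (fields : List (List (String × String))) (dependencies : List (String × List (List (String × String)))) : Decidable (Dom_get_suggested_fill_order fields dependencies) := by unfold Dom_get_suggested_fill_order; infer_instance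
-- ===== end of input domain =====

-- B replaces A's three classification passes over field_names (and A's per-trigger dict of
-- dependent-name sets) by one flat trigger/dependent-set construction and a single pass that
-- sorts each name into one of three lists; same return value, proved equal on all inputs.

-- ===== PORT A =====
-- shared with port B: f.get('name') and dep.get('field', '')
def pvGetName (f : List (String × String)) : Option String := (PySem.Dict.mk f).get? "name"
def pvDepName (dep : List (String × String)) : String := (PySem.Dict.mk dep).getD "field" ""

-- field_names = [f.get('name') for f in fields if f.get('name')]
def pvFieldNames (fields : List (List (String × String))) : List String :=
  fields.foldl (fun acc f =>
    match pvGetName f with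
    | some s => if s ≠ "" then acc ++ [s] else acc
    | none => acc) []

-- inner loop 'for dep in deps: … dependents[trigger].add(dep_name)'
def pvAddDeps (t : String) (deps : List (List (String × String)))
    (d : PySem.Dict String (PySem.Set String)) : PySem.Dict String (PySem.Set String) :=
  deps.foldl (fun d dep =>
    if pvDepName dep ≠ "" then d.modify t PySem.Set.empty (fun s => s.add (pvDepName dep)) else d) d

-- one iteration of 'for trigger, deps in dependencies.items(): …'
def pvOuterStep (d : PySem.Dict String (PySem.Set String))
    (p : String × List (List (String × String))) : PySem.Dict String (PySem.Set String) :=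
  pvAddDeps p.1 p.2 (if d.contains p.1 then d else d.insert p.1 PySem.Set.empty)

def get_suggested_fill_order (fields : List (List (String × String))) (dependencies : List (String × List (List (String × String)))) : List String :=
  let field_names := pvFieldNames fields
  let dependents : PySem.Dict String (PySem.Set String) := dependencies.foldl pvOuterStep PySem.Dict.empty
  let triggers : List String := dependents.keys
  let dependent_fields : PySem.Set String :=
    dependents.values.foldl (fun s v => PySem.Set.update s v) PySem.Set.empty
  let o1 := field_names.foldl (fun acc n => if triggers.contains n then acc ++ [n] else acc) []
  let o2 := field_names.foldl (fun acc n => if !triggers.contains n && !dependent_fields.contains n then acc ++ [n] else acc) o1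
  field_names.foldl (fun acc n => if dependent_fields.contains n && !acc.contains n then acc ++ [n] else acc) o2

-- ===== PORT B =====
-- classify one (truthy) name into (triggers, independents, dependents, seen)
def pvClassify (ts ds : PySem.Set String)
    (st : List String × List String × List String × PySem.Set String) (name : String) :
    List String × List String × List String × PySem.Set String :=
  if ts.contains name then (st.1 ++ [name], st.2.1, st.2.2.1, st.2.2.2)
  else if !ds.contains name then (st.1, st.2.1 ++ [name], st.2.2.1, st.2.2.2)
  else if !st.2.2.2.contains name then (st.1, st.2.1, st.2.2.1 ++ [name], st.2.2.2.add name)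
  else st

def get_suggested_fill_order_alt (fields : List (List (String × String))) (dependencies : List (String × List (List (String × String)))) : List String :=
  let trigger_set : PySem.Set String := PySem.Set.ofList (dependencies.map (·.1))
  let dep_set : PySem.Set String :=
    dependencies.foldl (fun s p =>
      p.2.foldl (fun s dep => if pvDepName dep ≠ "" then s.add (pvDepName dep) else s) s)
      PySem.Set.empty
  let st := fields.foldl (fun st f =>
      match pvGetName f with
      | none => st
      | some name => if name = "" then st else pvClassify trigger_set dep_set st name)
    ([], [], [], PySem.Set.empty)
  st.1 ++ st.2.1 ++ st.2.2.1

-- ===== PRECONDITION & SPEC =====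
def Spec_get_suggested_fill_order (fields : List (List (String × String))) (dependencies : List (String × List (List (String × String)))) (out : List String) : Prop := out = get_suggested_fill_order_alt fields dependencies
instance (fields : List (List (String × String))) (dependencies : List (String × List (List (String × String)))) (out : List String) : Decidable (Spec_get_suggested_fill_order fields dependencies out) := by unfold Spec_get_suggested_fill_order; infer_instance

-- ===== CLAIM (what is proved, stated in full; the proofs are below) =====
def Claim_equal_get_suggested_fill_order : Prop := ∀ (fields : List (List (String × String))) (dependencies : List (String × List (List (String × String)))), Dom_get_suggested_fill_order fields dependencies → Spec_get_suggested_fill_order fields dependencies (get_suggested_fill_order fields dependencies)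

-- ===== LEMMAS AND PROOFS =====

-- 'dep yields the nonempty dependent name n' (one dep list)
def pvDepP (deps : List (List (String × String))) (n : String) : Prop :=
  ∃ dep ∈ deps, pvDepName dep ≠ "" ∧ n = pvDepName dep

-- the dedup'd dependent list (and final seen set) both programs produce over names
def pvThirdP (T D : String → Bool) : List String → PySem.Set String → List String × PySem.Set String
  | [], s => ([], s)
  | n :: ns, s =>
      if !T n && D n && !s.contains n then
        let r := pvThirdP T D ns (s.add n); (n :: r.1, r.2)
      else pvThirdP T D ns s

lemma pvFieldNames_acc (fields : List (List (String × String))) (acc : List String) :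
    fields.foldl (fun acc f =>
      match pvGetName f with
      | some s => if s ≠ "" then acc ++ [s] else acc
      | none => acc) acc = acc ++ pvFieldNames fields := by
  induction fields generalizing acc with
  | nil => simp [pvFieldNames]
  | cons f fs ih =>
    simp only [List.foldl_cons, pvFieldNames]
    rw [ih, ih]
    rcases h : pvGetName f with _ | s
    · simp
    · by_cases hs : s = "" <;> simp [hs]

lemma pvBridge {σ : Type} (g : σ → String → σ) (fields : List (List (String × String))) (init : σ) :
    fields.foldl (fun st f =>
      match pvGetName f with
      | none => st
      | some name => if name = "" then st else g st name) init
    = (pvFieldNames fields).foldl g init := by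
  induction fields generalizing init with
  | nil => simp [pvFieldNames]
  | cons f fs ih =>
    have hfn : pvFieldNames (f :: fs) = (match pvGetName f with
      | some s => if s ≠ "" then [s] else ([] : List String)
      | none => []) ++ pvFieldNames fs := by
      simp only [pvFieldNames, List.foldl_cons]
      rw [pvFieldNames_acc]
      rcases h : pvGetName f with _ | s
      · simp [pvFieldNames]
      · by_cases hs : s = "" <;> simp [hs, pvFieldNames]
    rw [List.foldl_cons, ih, hfn]
    rcases h : pvGetName f with _ | s
    · simp
    · by_cases hs : s = "" <;> simp [hs]

lemma pvMem_foldl_update (vs : List (PySem.Set String)) (s : PySem.Set String) (n : String) :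
    n ∈ vs.foldl (fun s v => PySem.Set.update s v) s ↔ n ∈ s ∨ ∃ v ∈ vs, n ∈ v := by
  induction vs generalizing s with
  | nil => simp
  | cons v vs ih => simp [ih, PySem.Set.mem_update]; tauto

lemma pvMem_inner_depset (deps : List (List (String × String))) (s : PySem.Set String) (n : String) :
    n ∈ deps.foldl (fun s dep => if pvDepName dep ≠ "" then s.add (pvDepName dep) else s) s ↔
      n ∈ s ∨ pvDepP deps n := by
  induction deps generalizing s with
  | nil => simp [pvDepP]
  | cons dep deps ih =>
    rw [List.foldl_cons]
    by_cases h : pvDepName dep = ""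
    · rw [if_neg (by simpa using h), ih]
      simp only [pvDepP, List.mem_cons]
      constructor
      · rintro (hs | ⟨d, hd, hne, he⟩)
        · exact Or.inl hs
        · exact Or.inr ⟨d, Or.inr hd, hne, he⟩
      · rintro (hs | ⟨d, (rfl | hd), hne, he⟩)
        · exact Or.inl hs
        · exact absurd h hne
        · exact Or.inr ⟨d, hd, hne, he⟩
    · rw [if_pos (by simpa using h), ih]
      simp only [pvDepP, List.mem_cons, PySem.Set.mem_add]
      constructor
      · rintro (⟨hs | rfl⟩ | ⟨d, hd, hne, he⟩)
        · exact Or.inl hs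
        · exact Or.inr ⟨dep, Or.inl rfl, h, rfl⟩
        · exact Or.inr ⟨d, Or.inr hd, hne, he⟩
      · rintro (hs | ⟨d, (rfl | hd), hne, he⟩)
        · exact Or.inl (Or.inl hs)
        · exact Or.inl (Or.inr he)
        · exact Or.inr ⟨d, hd, hne, he⟩

lemma pvMem_depSetB (l : List (String × List (List (String × String)))) (s : PySem.Set String) (n : String) :
    n ∈ l.foldl (fun s p =>
        p.2.foldl (fun s dep => if pvDepName dep ≠ "" then s.add (pvDepName dep) else s) s) s ↔
      n ∈ s ∨ ∃ p ∈ l, pvDepP p.2 n := by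
  induction l generalizing s with
  | nil => simp
  | cons p l ih =>
    rw [List.foldl_cons, ih, pvMem_inner_depset]
    simp only [List.mem_cons]
    constructor
    · rintro (⟨hs | hq⟩ | ⟨q, hq, hd⟩)
      · exact Or.inl hs
      · exact Or.inr ⟨p, Or.inl rfl, hq⟩
      · exact Or.inr ⟨q, Or.inr hq, hd⟩
    · rintro (hs | ⟨q, (rfl | hq), hd⟩)
      · exact Or.inl (Or.inl hs)
      · exact Or.inl (Or.inr hd)
      · exact Or.inr ⟨q, hq, hd⟩

lemma pvAddDeps_cons (t : String) (dep : List (String × String)) (deps : List (List (String × String)))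
    (d : PySem.Dict String (PySem.Set String)) :
    pvAddDeps t (dep :: deps) d =
      pvAddDeps t deps
        (if pvDepName dep ≠ "" then d.modify t PySem.Set.empty (fun s => s.add (pvDepName dep)) else d) := rfl

lemma pvAddDeps_contains (t : String) (deps : List (List (String × String)))
    (d : PySem.Dict String (PySem.Set String)) (h : d.contains t = true) (k : String) :
    (pvAddDeps t deps d).contains k = d.contains k := by
  induction deps generalizing d with
  | nil => rfl
  | cons dep deps ih =>
    rw [pvAddDeps_cons]
    by_cases hc : pvDepName dep = ""
    · rw [if_neg (by simpa using hc)]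
      exact ih d h
    · rw [if_pos (by simpa using hc)]
      have h' : (d.modify t PySem.Set.empty (fun s => s.add (pvDepName dep))).contains t = true := by
        rw [PySem.Dict.contains_modify]; simp
      rw [ih _ h', PySem.Dict.contains_modify]
      by_cases hk : k = t
      · subst hk; simp [h]
      · simp [hk]

lemma pvAddDeps_keys (t : String) (deps : List (List (String × String)))
    (d : PySem.Dict String (PySem.Set String)) (h : d.contains t = true) :
    (pvAddDeps t deps d).keys = d.keys := by
  induction deps generalizing d with
  | nil => rfl
  | cons dep deps ih =>
    rw [pvAddDeps_cons]
    by_cases hc : pvDepName dep = ""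
    · rw [if_neg (by simpa using hc)]; exact ih d h
    · rw [if_pos (by simpa using hc)]
      have h' : (d.modify t PySem.Set.empty (fun s => s.add (pvDepName dep))).contains t = true := by
        rw [PySem.Dict.contains_modify]; simp
      rw [ih _ h', PySem.Dict.keys_modify, PySem.Dict.keys_insert_of_contains _ _ h]

lemma pvAddDeps_getD (t : String) (deps : List (List (String × String)))
    (d : PySem.Dict String (PySem.Set String)) (k n : String) :
    n ∈ (pvAddDeps t deps d).getD k PySem.Set.empty ↔
      n ∈ d.getD k PySem.Set.empty ∨ (k = t ∧ pvDepP deps n) := by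
  induction deps generalizing d with
  | nil => simp [pvAddDeps, pvDepP]
  | cons dep deps ih =>
    rw [pvAddDeps_cons]
    by_cases hc : pvDepName dep = ""
    · rw [if_neg (by simpa using hc), ih]
      simp only [pvDepP, List.mem_cons]
      constructor
      · rintro (hs | ⟨rfl, dd, hd, hne, he⟩)
        · exact Or.inl hs
        · exact Or.inr ⟨rfl, dd, Or.inr hd, hne, he⟩
      · rintro (hs | ⟨rfl, dd, (rfl | hd), hne, he⟩)
        · exact Or.inl hs
        · exact absurd hc hne
        · exact Or.inr ⟨rfl, dd, hd, hne, he⟩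
    · rw [if_pos (by simpa using hc), ih, PySem.Dict.getD_modify]
      by_cases hk : k = t
      · subst hk
        rw [if_pos rfl]
        simp only [PySem.Set.mem_add, pvDepP, List.mem_cons, true_and]
        constructor
        · rintro (⟨hs | rfl⟩ | ⟨dd, hd, hne, he⟩)
          · exact Or.inl hs
          · exact Or.inr ⟨dep, Or.inl rfl, hc, rfl⟩
          · exact Or.inr ⟨dd, Or.inr hd, hne, he⟩
        · rintro (hs | ⟨dd, (rfl | hd), hne, he⟩)
          · exact Or.inl (Or.inl hs)
          · exact Or.inl (Or.inr he)
          · exact Or.inr ⟨dd, hd, hne, he⟩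
      · rw [if_neg hk]
        simp [pvDepP, hk]

lemma pvOuter_inv (l : List (String × List (List (String × String))))
    (d : PySem.Dict String (PySem.Set String)) (h : d.keys.Nodup) :
    (l.foldl pvOuterStep d).keys.Nodup ∧
    (∀ k, (l.foldl pvOuterStep d).contains k = true ↔ d.contains k = true ∨ k ∈ l.map (·.1)) ∧
    (∀ k n, n ∈ (l.foldl pvOuterStep d).getD k PySem.Set.empty ↔
      n ∈ d.getD k PySem.Set.empty ∨ ∃ p ∈ l, p.1 = k ∧ pvDepP p.2 n) := by
  induction l generalizing d with
  | nil => simp [h]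
  | cons p l ih =>
    rw [List.foldl_cons]
    by_cases hcp : d.contains p.1 = true
    case pos =>
      have hstep : pvOuterStep d p = pvAddDeps p.1 p.2 d := by
        unfold pvOuterStep; rw [if_pos hcp]
      rw [hstep]
      have hc1 : (pvAddDeps p.1 p.2 d).contains p.1 = true := by
        rw [pvAddDeps_contains _ _ _ hcp]; exact hcp
      have hnd1 : (pvAddDeps p.1 p.2 d).keys.Nodup := by
        rw [pvAddDeps_keys _ _ _ hcp]; exact h
      obtain ⟨ihnd, ihcon, ihgd⟩ := ih (pvAddDeps p.1 p.2 d) hnd1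
      refine ⟨ihnd, ?_, ?_⟩
      · intro k
        rw [ihcon k, pvAddDeps_contains _ _ _ hcp]
        simp only [List.map_cons, List.mem_cons]
        constructor
        · rintro (hk | hm)
          · exact Or.inl hk
          · exact Or.inr (Or.inr hm)
        · rintro (hk | (rfl | hm))
          · exact Or.inl hk
          · exact Or.inl hcp
          · exact Or.inr hm
      · intro k n
        rw [ihgd k n, pvAddDeps_getD]
        simp only [List.mem_cons]
        constructor
        · rintro (⟨hs | ⟨rfl, hdp⟩⟩ | ⟨q, hq, hqk, hd⟩)
          · exact Or.inl hs
          · exact Or.inr ⟨p, Or.inl rfl, rfl, hdp⟩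
          · exact Or.inr ⟨q, Or.inr hq, hqk, hd⟩
        · rintro (hs | ⟨q, (rfl | hq), hqk, hd⟩)
          · exact Or.inl (Or.inl hs)
          · exact Or.inl (Or.inr ⟨hqk.symm, hd⟩)
          · exact Or.inr ⟨q, hq, hqk, hd⟩
    case neg =>
      have hcpf : d.contains p.1 = false := by simpa using hcp
      have hstep : pvOuterStep d p = pvAddDeps p.1 p.2 (d.insert p.1 PySem.Set.empty) := by
        unfold pvOuterStep; rw [if_neg hcp]
      rw [hstep]
      have hc2 : (d.insert p.1 PySem.Set.empty).contains p.1 = true := by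
        rw [PySem.Dict.contains_insert]; simp
      have hnd2 : (d.insert p.1 PySem.Set.empty).keys.Nodup :=
        PySem.Dict.nodup_keys_insert _ _ _ h
      have hc1 : (pvAddDeps p.1 p.2 (d.insert p.1 PySem.Set.empty)).contains p.1 = true := by
        rw [pvAddDeps_contains _ _ _ hc2]; exact hc2
      have hnd1 : (pvAddDeps p.1 p.2 (d.insert p.1 PySem.Set.empty)).keys.Nodup := by
        rw [pvAddDeps_keys _ _ _ hc2]; exact hnd2
      obtain ⟨ihnd, ihcon, ihgd⟩ := ih _ hnd1
      refine ⟨ihnd, ?_, ?_⟩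
      · intro k
        rw [ihcon k, pvAddDeps_contains _ _ _ hc2, PySem.Dict.contains_insert]
        simp only [List.map_cons, List.mem_cons, Bool.or_eq_true, beq_iff_eq]
        tauto
      · intro k n
        rw [ihgd k n, pvAddDeps_getD, PySem.Dict.getD_insert]
        by_cases hk : k = p.1
        · subst hk
          rw [if_pos rfl, PySem.Dict.getD_of_not_contains _ _ hcpf]
          simp only [List.mem_cons]
          constructor
          · rintro (⟨hs | ⟨-, hdp⟩⟩ | ⟨q, hq, hqk, hd⟩)
            · simp [PySem.Set.empty] at hs
            · exact Or.inr ⟨p, Or.inl rfl, rfl, hdp⟩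
            · exact Or.inr ⟨q, Or.inr hq, hqk, hd⟩
          · rintro (hs | ⟨q, (rfl | hq), hqk, hd⟩)
            · exact Or.inl (Or.inl hs)
            · exact Or.inl (Or.inr ⟨by trivial, hd⟩)
            · exact Or.inr ⟨q, hq, hqk, hd⟩
        · rw [if_neg hk]
          simp only [List.mem_cons]
          constructor
          · rintro (⟨hs | ⟨rfl, hdp⟩⟩ | ⟨q, hq, hqk, hd⟩)
            · exact Or.inl hs
            · exact absurd rfl hk
            · exact Or.inr ⟨q, Or.inr hq, hqk, hd⟩
          · rintro (hs | ⟨q, (rfl | hq), hqk, hd⟩)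
            · exact Or.inl (Or.inl hs)
            · exact absurd hqk.symm hk
            · exact Or.inr ⟨q, hq, hqk, hd⟩

lemma pvPassA3 (df : PySem.Set String) (tg : List String) (names : List String)
    (acc : List String) (seen : PySem.Set String)
    (hinv : ∀ n ∈ names, df.contains n = true → acc.contains n = (tg.contains n || seen.contains n)) :
    names.foldl (fun acc n => if df.contains n && !acc.contains n then acc ++ [n] else acc) acc
      = acc ++ (pvThirdP (fun n => tg.contains n) (fun n => df.contains n) names seen).1 := by
  induction names generalizing acc seen with
  | nil => simp [pvThirdP]
  | cons n ns ih =>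
    rw [List.foldl_cons]
    cases hD : df.contains n with
    | false =>
      rw [pvThirdP]
      simp only [hD, Bool.false_and, Bool.and_false, Bool.false_eq_true, if_neg (by simp : ¬(false = true))]
      exact ih acc seen (fun m hm => hinv m (List.mem_cons_of_mem _ hm))
    | true =>
      have hacc := hinv n (List.mem_cons_self) hD
      rw [pvThirdP]
      cases hT : tg.contains n with
      | true =>
        have : acc.contains n = true := by rw [hacc, hT]; simp
        simp only [hD, hT, this, Bool.not_true, Bool.false_and, Bool.true_and, Bool.and_false,
          Bool.false_eq_true, if_neg (by simp : ¬(false = true))]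
        exact ih acc seen (fun m hm => hinv m (List.mem_cons_of_mem _ hm))
      | false =>
        cases hS : seen.contains n with
        | true =>
          have : acc.contains n = true := by rw [hacc, hT, hS]; simp
          simp only [hD, hT, hS, this, Bool.not_true, Bool.true_and, Bool.and_false,
            Bool.false_eq_true, if_neg (by simp : ¬(false = true))]
          exact ih acc seen (fun m hm => hinv m (List.mem_cons_of_mem _ hm))
        | false =>
          have haccn : acc.contains n = false := by rw [hacc, hT, hS]; simp
          simp only [hD, hT, hS, haccn, Bool.not_false, Bool.true_and, Bool.and_true]
          rw [if_pos (by trivial), if_pos (by trivial)]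
          rw [ih (acc ++ [n]) (seen.add n) ?_]
          · simp
          · intro m hm hDm
            rw [List.contains_append, hinv m (List.mem_cons_of_mem _ hm) hDm]
            have hsa : (seen.add n).contains m = (seen.contains m || (m == n)) := by
              rcases Bool.eq_false_or_eq_true ((seen.add n).contains m) with h1 | h1 <;>
                rw [h1] <;> rw [Bool.eq_iff_iff] at h1 ⊢ <;>
                simp [PySem.Set.contains_iff, PySem.Set.mem_add] at h1 ⊢ <;> tauto
            rw [hsa]
            have : ([n].contains m) = (m == n) := by simp [List.contains_iff_mem]; rfl
            rw [this]
            rcases Bool.eq_false_or_eq_true (m == n) with h2 | h2 <;> rw [h2] <;> simp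
  termination_by names => names.length

lemma pvPassB (ts ds : PySem.Set String) (names : List String)
    (t i dp : List String) (seen : PySem.Set String) :
    names.foldl (pvClassify ts ds) (t, i, dp, seen)
      = (t ++ names.filter (fun n => ts.contains n),
         i ++ names.filter (fun n => !ts.contains n && !ds.contains n),
         dp ++ (pvThirdP (fun n => ts.contains n) (fun n => ds.contains n) names seen).1,
         (pvThirdP (fun n => ts.contains n) (fun n => ds.contains n) names seen).2) := by
  induction names generalizing t i dp seen with
  | nil => simp [pvThirdP]
  | cons n ns ih =>
    rw [List.foldl_cons, pvThirdP]
    have hstep : pvClassify ts ds (t, i, dp, seen) n =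
        if ts.contains n then (t ++ [n], i, dp, seen)
        else if !ds.contains n then (t, i ++ [n], dp, seen)
        else if !seen.contains n then (t, i, dp ++ [n], seen.add n)
        else (t, i, dp, seen) := rfl
    rw [hstep]
    cases hT : ts.contains n with
    | true =>
      rw [if_pos rfl, ih]
      simp [List.filter_cons, (by simpa using hT : n ∈ ts)]
    | false =>
      rw [if_neg (by simp [hT])]
      cases hD : ds.contains n with
      | false =>
        rw [if_pos (by simp [hD]), ih]
        simp [List.filter_cons, (by simpa using hT : n ∉ ts), (by simpa using hD : n ∉ ds)]
      | true =>
        rw [if_neg (by simp [hD])]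
        cases hS : seen.contains n with
        | false =>
          rw [if_pos (by simp [hS]), ih]
          simp [List.filter_cons, (by simpa using hT : n ∉ ts), (by simpa using hD : n ∈ ds), (by simpa using hS : n ∉ seen)]
        | true =>
          rw [if_neg (by simp [hS]), ih]
          simp [List.filter_cons, (by simpa using hT : n ∉ ts), (by simpa using hD : n ∈ ds), (by simpa using hS : n ∈ seen)]
  termination_by names => names.length

lemma pvBoolEq {a b : Bool} (h : (a = true) ↔ (b = true)) : a = b := by
  cases a <;> cases b <;> simp_all

lemma pvMain (fields : List (List (String × String))) (dependencies : List (String × List (List (String × String)))) :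
    get_suggested_fill_order fields dependencies = get_suggested_fill_order_alt fields dependencies := by
  have eA : get_suggested_fill_order fields dependencies =
      (pvFieldNames fields).foldl (fun acc n =>
          if ((dependencies.foldl pvOuterStep PySem.Dict.empty).values.foldl
                (fun s v => PySem.Set.update s v) PySem.Set.empty).contains n && !acc.contains n
          then acc ++ [n] else acc)
        ((pvFieldNames fields).foldl (fun acc n =>
            if !((dependencies.foldl pvOuterStep PySem.Dict.empty).keys.contains n)
                && !((dependencies.foldl pvOuterStep PySem.Dict.empty).values.foldl
                      (fun s v => PySem.Set.update s v) PySem.Set.empty).contains n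
            then acc ++ [n] else acc)
          ((pvFieldNames fields).foldl (fun acc n =>
              if (dependencies.foldl pvOuterStep PySem.Dict.empty).keys.contains n
              then acc ++ [n] else acc) [])) := rfl
  have eB : get_suggested_fill_order_alt fields dependencies =
      (fields.foldl (fun st f =>
          match pvGetName f with
          | none => st
          | some name => if name = "" then st
              else pvClassify (PySem.Set.ofList (dependencies.map (·.1)))
                (dependencies.foldl (fun s p =>
                    p.2.foldl (fun s dep => if pvDepName dep ≠ "" then s.add (pvDepName dep) else s) s)
                  PySem.Set.empty) st name)
        ([], [], [], PySem.Set.empty)).1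
      ++ (fields.foldl (fun st f =>
          match pvGetName f with
          | none => st
          | some name => if name = "" then st
              else pvClassify (PySem.Set.ofList (dependencies.map (·.1)))
                (dependencies.foldl (fun s p =>
                    p.2.foldl (fun s dep => if pvDepName dep ≠ "" then s.add (pvDepName dep) else s) s)
                  PySem.Set.empty) st name)
        ([], [], [], PySem.Set.empty)).2.1
      ++ (fields.foldl (fun st f =>
          match pvGetName f with
          | none => st
          | some name => if name = "" then st
              else pvClassify (PySem.Set.ofList (dependencies.map (·.1)))
                (dependencies.foldl (fun s p =>
                    p.2.foldl (fun s dep => if pvDepName dep ≠ "" then s.add (pvDepName dep) else s) s)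
                  PySem.Set.empty) st name)
        ([], [], [], PySem.Set.empty)).2.2.1 := rfl
  rw [eA, eB]
  set names := pvFieldNames fields with hnames
  set DEPD := dependencies.foldl pvOuterStep PySem.Dict.empty with hDEPD
  obtain ⟨hnd, hcon, hgd⟩ := pvOuter_inv dependencies PySem.Dict.empty (by simp)
  rw [← hDEPD] at hnd hcon hgd
  set tg : List String := DEPD.keys with htg
  set df : PySem.Set String := DEPD.values.foldl (fun s v => PySem.Set.update s v) PySem.Set.empty with hdf
  set ts : PySem.Set String := PySem.Set.ofList (dependencies.map (·.1)) with hts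
  set ds : PySem.Set String := dependencies.foldl (fun s p =>
      p.2.foldl (fun s dep => if pvDepName dep ≠ "" then s.add (pvDepName dep) else s) s)
    PySem.Set.empty with hds
  have hkeys : ∀ k, k ∈ tg ↔ k ∈ dependencies.map (·.1) := by
    intro k
    rw [htg, ← PySem.Dict.contains_iff_mem_keys, hcon k, PySem.Dict.contains_empty]
    simp
  have hT : ∀ n, tg.contains n = ts.contains n := by
    intro n
    have h1 : tg.contains n = true ↔ n ∈ dependencies.map (·.1) := by
      rw [List.contains_iff_mem]; exact hkeys n
    have h2 : ts.contains n = true ↔ n ∈ dependencies.map (·.1) := by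
      rw [hts, PySem.Set.contains_iff, PySem.Set.mem_ofList]
    exact pvBoolEq (h1.trans h2.symm)
  have hD : ∀ n, df.contains n = ds.contains n := by
    intro n
    have h1 : df.contains n = true ↔ ∃ p ∈ dependencies, pvDepP p.2 n := by
      rw [hdf, PySem.Set.contains_iff, pvMem_foldl_update,
        PySem.Dict.values_eq_map_keys DEPD hnd PySem.Set.empty]
      constructor
      · rintro (hmem | ⟨v, hv, hnv⟩)
        · simp [PySem.Set.empty] at hmem
        · rw [List.mem_map] at hv
          obtain ⟨k, hk, rfl⟩ := hv
          rw [hgd k n] at hnv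
          rcases hnv with hmem | ⟨p, hp, hpk, hdp⟩
          · rw [PySem.Dict.getD_empty] at hmem; simp [PySem.Set.empty] at hmem
          · exact ⟨p, hp, hdp⟩
      · rintro ⟨p, hp, hdp⟩
        refine Or.inr ⟨DEPD.getD p.1 PySem.Set.empty, ?_, ?_⟩
        · rw [List.mem_map]
          exact ⟨p.1, (hkeys p.1).mpr (List.mem_map_of_mem hp), rfl⟩
        · rw [hgd p.1 n]
          exact Or.inr ⟨p, hp, rfl, hdp⟩
    have h2 : ds.contains n = true ↔ ∃ p ∈ dependencies, pvDepP p.2 n := by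
      rw [hds, PySem.Set.contains_iff, pvMem_depSetB]
      simp [PySem.Set.empty]
    exact pvBoolEq (h1.trans h2.symm)
  have hTf : (fun n => tg.contains n) = (fun n => ts.contains n) := funext hT
  have hDf : (fun n => df.contains n) = (fun n => ds.contains n) := funext hD
  have hIf : (fun n => !tg.contains n && !df.contains n) = (fun n => !ts.contains n && !ds.contains n) :=
    funext (fun n => by rw [hT n, hD n])
  -- A's first two passes are filters
  rw [PySem.List.foldl_append_if (fun n => tg.contains n) (fun n => n) names []]
  rw [PySem.List.foldl_append_if (fun n => !tg.contains n && !df.contains n) (fun n => n) names]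
  simp only [List.nil_append, List.map_id']
  -- A's third pass
  have hinv : ∀ n ∈ names, df.contains n = true →
      (names.filter (fun n => tg.contains n)
        ++ names.filter (fun n => !tg.contains n && !df.contains n)).contains n
        = (tg.contains n || PySem.Set.contains PySem.Set.empty n) := by
    intro n hn hdfn
    have hse : PySem.Set.contains PySem.Set.empty n = false := rfl
    rw [hse, Bool.or_false]
    cases htn : tg.contains n with
    | true =>
      exact List.contains_iff_mem.mpr
        (List.mem_append_left _ (List.mem_filter.mpr ⟨hn, htn⟩))
    | false =>
      have hnotmem : n ∉ names.filter (fun n => tg.contains n)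
          ++ names.filter (fun n => !tg.contains n && !df.contains n) := by
        simp only [List.mem_append, List.mem_filter, htn, hdfn]
        simp
      cases hc : (names.filter (fun n => tg.contains n)
          ++ names.filter (fun n => !tg.contains n && !df.contains n)).contains n with
      | false => rfl
      | true => exact absurd (List.contains_iff_mem.mp hc) hnotmem
  rw [pvPassA3 df tg names _ PySem.Set.empty hinv]
  rw [hTf, hDf, hIf]
  -- B's single pass
  rw [pvBridge (pvClassify ts ds) fields, ← hnames, pvPassB ts ds names [] [] [] PySem.Set.empty]
  simp

-- ===== VERDICT (by name: the statement is the Claim_ definition above) =====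
theorem get_suggested_fill_order_spec : Claim_equal_get_suggested_fill_order := by
  intro fields dependencies _
  exact pvMain fields dependencies
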